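-- pv_equiv track=rewrite | github.com/cs481-ekh/s24--1 | SourceTemp-Peter/DescentNew.py | DetermineSepChar
-- ===== SOURCE A (Python) =====
-- def DetermineSepChar(d):
--     sepchars = ['\t', ',', ' ']
--     counts = {s: [] for s in sepchars}
--     for line in d[:10]:
--         for sep in sepchars:
--             counts[sep].append(line.count(sep))
--     for sep, count_list in counts.items():
--         if count_list[0] != 0 and count_list.count(count_list[0]) == len(count_list):
--             return sep
--     return None  # Default to None if no consistent separator is found
-- ===== SOURCE B (Python) =====
-- def _upd(st, c):
--     # fold one observed count c into the running (first_count, still_consistent) state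
--     if st is None:
--         return (c, True)
--     return (st[0], st[1] and c == st[0])
--
--
-- def DetermineSepChar(d):
--     seps = ['\t', ',', ' ']
--     state = {s: None for s in seps}
--     for line in d[:10]:
--         freq = {}
--         for ch in line:
--             freq[ch] = freq.get(ch, 0) + 1
--         for s in seps:
--             state[s] = _upd(state[s], freq.get(s, 0))
--     for s in seps:
--         st = state[s]
--         if st is not None and st[0] != 0 and st[1]:
--             return s
--     return None
-- ===== Notes on version B (the rewrite author's own statement) =====
-- stated objective: alternative
-- what changed: B makes one streaming pass over the first 10 lines, maintaining per separator a running (first_count, still_consistent) accumulator and obtaining per-line counts from a character-frequency dict built in one scan of the line, instead of A's table of full count lists built with str.count and then scanned; B needs no count lists and checks consistency online.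
-- outside the precondition, e.g. on DetermineSepChar([]): A raises IndexError, B returns None
import Mathlib
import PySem

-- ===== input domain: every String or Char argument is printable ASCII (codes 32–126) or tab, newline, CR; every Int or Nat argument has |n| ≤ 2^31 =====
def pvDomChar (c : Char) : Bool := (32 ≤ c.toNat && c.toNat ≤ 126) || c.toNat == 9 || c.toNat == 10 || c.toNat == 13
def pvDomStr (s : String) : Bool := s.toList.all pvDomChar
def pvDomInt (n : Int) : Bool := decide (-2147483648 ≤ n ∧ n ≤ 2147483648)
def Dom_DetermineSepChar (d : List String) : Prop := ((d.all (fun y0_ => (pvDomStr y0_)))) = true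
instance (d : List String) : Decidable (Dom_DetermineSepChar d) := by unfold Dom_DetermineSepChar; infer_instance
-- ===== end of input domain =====

-- B replaces A's str.count-built dict of count lists (built fully, then scanned) by one streaming
-- pass keeping a running (first, consistent) accumulator per separator, with counts taken from a
-- per-line character-frequency dict; alternative decomposition, same order of cost.


-- ===== PORT A =====
-- inner loop body: for sep in sepchars: counts[sep].append(line.count(sep))
def pvStepA (counts : PySem.Dict String (List Int)) (line : String) : PySem.Dict String (List Int) :=
  ["\t", ",", " "].foldl
    (fun acc sep => acc.modify sep [] (fun l => l ++ [(PySem.Str.count line sep : Int)])) counts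

-- the final loop: for sep, count_list in counts.items(): …
-- (count_list[0] on an empty list is Python's IndexError; those inputs are excluded by Pre_)
def pvScanA : List (String × List Int) → Option String
  | [] => none
  | (sep, cl) :: rest =>
    match PySem.List.pyGet? cl 0 with
    | none => none
    | some c0 =>
      if c0 ≠ 0 ∧ (PySem.List.count cl c0 : Int) = (cl.length : Int) then some sep
      else pvScanA rest

def DetermineSepChar (d : List String) : Option String :=
  let counts0 := (["\t", ",", " "]).foldl
    (fun acc s => acc.insert s ([] : List Int)) PySem.Dict.empty
  let counts := (PySem.List.slice d none (some 10)).foldl pvStepA counts0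
  pvScanA counts.items

-- ===== PORT B =====
-- _upd(st, c): fold one observed count into the (first, still_consistent) state
def pvUpd (st : Option (Int × Bool)) (c : Int) : Option (Int × Bool) :=
  match st with
  | none => some (c, true)
  | some (first, ok) => some (first, ok && c == first)

-- freq = {}; for ch in line: freq[ch] = freq.get(ch, 0) + 1   (keys are the 1-char strings)
def pvFreq (line : String) : PySem.Dict String Int :=
  line.toList.foldl
    (fun d ch => d.insert (String.ofList [ch]) (d.getD (String.ofList [ch]) 0 + 1)) PySem.Dict.empty

-- body of 'for line in d[:10]'
def pvStepB (st : PySem.Dict String (Option (Int × Bool))) (line : String) :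
    PySem.Dict String (Option (Int × Bool)) :=
  let freq := pvFreq line
  ["\t", ",", " "].foldl
    (fun acc s => acc.insert s (pvUpd (acc.getD s none) (freq.getD s 0))) st

-- final loop: first separator whose state is (first ≠ 0, consistent)
def pvScanB : PySem.Dict String (Option (Int × Bool)) → List String → Option String
  | _, [] => none
  | st, s :: rest =>
    match st.getD s none with
    | some (first, ok) => if first ≠ 0 ∧ ok then some s else pvScanB st rest
    | none => pvScanB st rest

def DetermineSepChar_alt (d : List String) : Option String :=
  let st0 := (["\t", ",", " "]).foldl
    (fun acc s => acc.insert s (none : Option (Int × Bool))) PySem.Dict.empty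
  let st := (PySem.List.slice d none (some 10)).foldl pvStepB st0
  pvScanB st ["\t", ",", " "]

-- ===== PRECONDITION & SPEC =====
-- A raises IndexError (count_list[0]) on the empty list; only [] is excluded.
def Pre_DetermineSepChar (d : List String) : Prop := d ≠ []
instance (d : List String) : Decidable (Pre_DetermineSepChar d) := by
  unfold Pre_DetermineSepChar; infer_instance

def pvWitness_DetermineSepChar : List String := ["a,b", "c,d"]

def Spec_DetermineSepChar (d : List String) (out : Option String) : Prop := out = DetermineSepChar_alt d
instance (d : List String) (out : Option String) : Decidable (Spec_DetermineSepChar d out) := by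
  unfold Spec_DetermineSepChar; infer_instance

-- ===== CLAIM (what is proved, stated in full; the proofs are below) =====
def Claim_equal_DetermineSepChar : Prop := ∀ (d : List String), Dom_DetermineSepChar d → Pre_DetermineSepChar d → Spec_DetermineSepChar d (DetermineSepChar d)

-- ===== LEMMAS AND PROOFS =====

-- proof-side abbreviation: A's count of separator s in a line
def pvCnt (s line : String) : Int := (PySem.Str.count line s : Int)

-- str.count with a single-character needle is the character count
lemma pv_go_singleton (c : Char) (s : List Char) (fuel : Nat) (acc : Nat)
    (h : s.length ≤ fuel) :
    PySem.Chars.count.go [c] fuel s acc = acc + s.count c := by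
  induction s generalizing fuel acc with
  | nil => cases fuel <;> simp [PySem.Chars.count.go]
  | cons x t ih =>
    cases fuel with
    | zero => simp at h
    | succ f =>
      simp only [List.length_cons, Nat.succ_le_succ_iff] at h
      by_cases hx : c = x
      · subst hx
        have : ([c].isPrefixOf (c :: t)) = true := by simp [List.isPrefixOf]
        simp [PySem.Chars.count.go, this, ih _ _ h]
        omega
      · have : ([c].isPrefixOf (x :: t)) = false := by
          simp [List.isPrefixOf]; exact fun hh => hx hh
        simp [PySem.Chars.count.go, this, ih _ _ h, List.count_cons]
        intro hh; exact absurd hh.symm hx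

lemma pv_count_singleton (c : Char) (line : String) :
    PySem.Str.count line (String.ofList [c]) = line.toList.count c := by
  have h : (String.ofList [c]).toList = [c] := String.toList_ofList
  rw [PySem.Str.count_eq, h, PySem.Chars.count]
  have hlen : line.toList.length ≤ line.length := by
    rw [String.length_toList]
  simp [pv_go_singleton c line.toList line.length 0 hlen, List.count]

-- the per-line frequency dict gives the same counts
lemma pv_freq_getD (line : String) (c : Char) :
    (pvFreq line).getD (String.ofList [c]) 0 = pvCnt (String.ofList [c]) line := by
  have hmap : pvFreq line =
      (line.toList.map (fun ch => String.ofList [ch])).foldl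
        (fun d k => d.insert k (d.getD k 0 + 1)) PySem.Dict.empty := by
    rw [List.foldl_map]; rfl
  have hinj : Function.Injective (fun ch => String.ofList [ch]) := by
    intro a b h
    have h2 := congrArg String.toList h
    simp only [String.toList_ofList] at h2
    exact List.singleton_injective h2
  rw [hmap, PySem.Dict.getD_foldl_insert_add_one,
      List.count_map_of_injective _ _ hinj]
  simp only [PySem.Dict.getD, PySem.Dict.get?, PySem.Dict.empty, pvCnt]
  rw [pv_count_singleton]
  simp [List.count]

-- one step of A's table build
lemma pv_stepA (l : String) (a b c : List Int) :
    pvStepA (PySem.Dict.mk [("\t", a), (",", b), (" ", c)]) l =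
      PySem.Dict.mk [("\t", a ++ [pvCnt "\t" l]), (",", b ++ [pvCnt "," l]),
                     (" ", c ++ [pvCnt " " l])] := by
  simp only [pvStepA, List.foldl_cons, List.foldl_nil, pvCnt]
  rw [PySem.Dict.modify, PySem.Dict.modify, PySem.Dict.modify]
  simp [PySem.Dict.getD, PySem.Dict.get?, PySem.Dict.insert, PySem.Dict.contains]

-- A's whole table build
lemma pv_buildA (lines : List String) (a b c : List Int) :
    lines.foldl pvStepA (PySem.Dict.mk [("\t", a), (",", b), (" ", c)]) =
      PySem.Dict.mk [("\t", a ++ lines.map (pvCnt "\t")),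
                     (",", b ++ lines.map (pvCnt ",")),
                     (" ", c ++ lines.map (pvCnt " "))] := by
  induction lines generalizing a b c with
  | nil => simp
  | cons l ls ih =>
    simp only [List.foldl_cons, pv_stepA, ih, List.map_cons, List.append_assoc,
      List.singleton_append]

-- one step of B's streaming pass
lemma pv_stepB (l : String) (u v w : Option (Int × Bool)) :
    pvStepB (PySem.Dict.mk [("\t", u), (",", v), (" ", w)]) l =
      PySem.Dict.mk [("\t", pvUpd u ((pvFreq l).getD "\t" 0)),
                     (",", pvUpd v ((pvFreq l).getD "," 0)),
                     (" ", pvUpd w ((pvFreq l).getD " " 0))] := by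
  simp only [pvStepB, List.foldl_cons, List.foldl_nil]
  simp [PySem.Dict.getD, PySem.Dict.get?, PySem.Dict.insert, PySem.Dict.contains]

-- B's whole streaming pass, per-key: folding pvUpd over the mapped counts
lemma pv_buildB (lines : List String) (u v w : Option (Int × Bool)) :
    lines.foldl pvStepB (PySem.Dict.mk [("\t", u), (",", v), (" ", w)]) =
      PySem.Dict.mk [("\t", (lines.map (fun l => (pvFreq l).getD "\t" 0)).foldl pvUpd u),
                     (",", (lines.map (fun l => (pvFreq l).getD "," 0)).foldl pvUpd v),
                     (" ", (lines.map (fun l => (pvFreq l).getD " " 0)).foldl pvUpd w)] := by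
  induction lines generalizing u v w with
  | nil => simp
  | cons l ls ih => simp only [List.foldl_cons, pv_stepB, ih, List.map_cons]

-- the accumulator characterised
lemma pv_upd_fold (cs : List Int) (f : Int) (ok : Bool) :
    cs.foldl pvUpd (some (f, ok)) = some (f, ok && cs.all (fun c => c == f)) := by
  induction cs generalizing ok with
  | nil => simp
  | cons c cs ih => simp [pvUpd, ih, Bool.and_assoc]

lemma pv_upd_fold_none (c0 : Int) (cs : List Int) :
    (c0 :: cs).foldl pvUpd none = some (c0, cs.all (fun c => c == c0)) := by
  simp [pvUpd, pv_upd_fold]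

lemma pv_count_iff (l : List Int) (x : Int) :
    ((PySem.List.count l x : Int) = (l.length : Int)) ↔ l.all (fun c => c == x) = true := by
  rw [PySem.List.count_eq, Int.natCast_inj, List.count_eq_length, List.all_eq_true]
  simp only [beq_iff_eq]
  exact ⟨fun h c hc => (h c hc).symm, fun h c hc => (h c hc).symm⟩

-- the A-side per-separator condition equals the B-side one
lemma pv_cond_iff (c : Int) (L : List Int) :
    (c ≠ 0 ∧ (PySem.List.count (c :: L) c : Int) = ((c :: L).length : Int)) ↔
    (c ≠ 0 ∧ L.all (fun x => x == c) = true) := by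
  refine and_congr_right fun _ => ?_
  rw [pv_count_iff]; simp

-- the two scans agree on the three-entry literal table / state
lemma pv_scan3 (c1 c2 c3 : Int) (L1 L2 L3 : List Int) :
    pvScanA [("\t", c1 :: L1), (",", c2 :: L2), (" ", c3 :: L3)] =
    pvScanB (PySem.Dict.mk
        [("\t", some (c1, L1.all (fun x => x == c1))),
         (",", some (c2, L2.all (fun x => x == c2))),
         (" ", some (c3, L3.all (fun x => x == c3)))]) ["\t", ",", " "] := by
  have g1 : (PySem.Dict.mk
      [("\t", some (c1, L1.all (fun x => x == c1))),
       (",", some (c2, L2.all (fun x => x == c2))),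
       (" ", some (c3, L3.all (fun x => x == c3)))]).getD "\t" none
      = some (c1, L1.all (fun x => x == c1)) := by
    simp [PySem.Dict.getD, PySem.Dict.get?]
  have g2 : (PySem.Dict.mk
      [("\t", some (c1, L1.all (fun x => x == c1))),
       (",", some (c2, L2.all (fun x => x == c2))),
       (" ", some (c3, L3.all (fun x => x == c3)))]).getD "," none
      = some (c2, L2.all (fun x => x == c2)) := by
    simp [PySem.Dict.getD, PySem.Dict.get?]
  have g3 : (PySem.Dict.mk
      [("\t", some (c1, L1.all (fun x => x == c1))),
       (",", some (c2, L2.all (fun x => x == c2))),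
       (" ", some (c3, L3.all (fun x => x == c3)))]).getD " " none
      = some (c3, L3.all (fun x => x == c3)) := by
    simp [PySem.Dict.getD, PySem.Dict.get?]
  have p1 : PySem.List.pyGet? (c1 :: L1) 0 = some c1 := by
    simp [PySem.List.pyGet?, PySem.List.pyIdx?]
  have p2 : PySem.List.pyGet? (c2 :: L2) 0 = some c2 := by
    simp [PySem.List.pyGet?, PySem.List.pyIdx?]
  have p3 : PySem.List.pyGet? (c3 :: L3) 0 = some c3 := by
    simp [PySem.List.pyGet?, PySem.List.pyIdx?]
  simp only [pvScanA, pvScanB, g1, g2, g3, p1, p2, p3]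
  refine if_congr (pv_cond_iff c1 L1) rfl ?_
  refine if_congr (pv_cond_iff c2 L2) rfl ?_
  exact if_congr (pv_cond_iff c3 L3) rfl rfl

-- ===== VERDICT (by name: the statements are the Claim_ definitions above) =====
theorem DetermineSepChar_spec : Claim_equal_DetermineSepChar := by
  intro d _ hpre
  obtain ⟨x, xs, rfl⟩ : ∃ y ys, d = y :: ys := by
    cases d with
    | nil => exact absurd rfl hpre
    | cons y ys => exact ⟨y, ys, rfl⟩
  unfold Spec_DetermineSepChar DetermineSepChar DetermineSepChar_alt
  have hsl : PySem.List.slice (x :: xs) none (some 10) = x :: xs.take 9 := by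
    rw [PySem.List.slice_to _ (by norm_num)]; rfl
  have hA0 : (["\t", ",", " "]).foldl
      (fun acc s => acc.insert s ([] : List Int)) PySem.Dict.empty =
      PySem.Dict.mk [("\t", []), (",", []), (" ", [])] := by decide
  have hB0 : (["\t", ",", " "]).foldl
      (fun acc s => acc.insert s (none : Option (Int × Bool))) PySem.Dict.empty =
      PySem.Dict.mk [("\t", none), (",", none), (" ", none)] := by decide
  have hf : ∀ s : String, ∀ l : String, s = "\t" ∨ s = "," ∨ s = " " →
      (pvFreq l).getD s 0 = pvCnt s l := by
    intro s l hs
    rcases hs with rfl | rfl | rfl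
    · exact pv_freq_getD l '\t'
    · exact pv_freq_getD l ','
    · exact pv_freq_getD l ' '
  simp only [hsl, hA0, hB0, pv_buildA, pv_buildB, List.map_cons, List.nil_append]
  rw [hf "\t" x (Or.inl rfl), hf "," x (Or.inr (Or.inl rfl)), hf " " x (Or.inr (Or.inr rfl))]
  have hmap : ∀ s : String, s = "\t" ∨ s = "," ∨ s = " " →
      (xs.take 9).map (fun l => (pvFreq l).getD s 0) = (xs.take 9).map (pvCnt s) := by
    intro s hs; exact List.map_congr_left fun l _ => hf s l hs
  rw [hmap "\t" (Or.inl rfl), hmap "," (Or.inr (Or.inl rfl)), hmap " " (Or.inr (Or.inr rfl))]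
  rw [pv_upd_fold_none, pv_upd_fold_none, pv_upd_fold_none]
  exact pv_scan3 _ _ _ _ _ _
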